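-- pv_equiv track=rewrite | github.com/jk-jung/problem-solving | codewars/5kyu/5_Reversi row rudiments.py | reversi_row
-- ===== SOURCE A (Python) =====
-- def reversi_row(m):
--     r = ['.' for _ in range(8)]
--
--     c = '*'
--     for x in m:
--         r[x] = c
--         idx = -1
--         for i in range(7, x, -1):
--             if r[i] == c: idx = i
--             if r[i] == '.': idx = -1
--         for i in range(x, idx):
--             if r[i] != '.': r[i] = c
--
--         idx = 999
--         for i in range(x):
--             if r[i] == c: idx = i
--             if r[i] == '.': idx = 999
--
--         for i in range(idx, x):
--             if r[i] != '.': r[i] = c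
--
--         c = 'O' if c == '*' else '*'
--
--     return ''.join(r)
-- ===== SOURCE B (Python) =====
-- def reversi_row(m):
--     r = ['.'] * 8
--     c = '*'
--     for x in m:
--         r[x] = c
--         # right: walk outward over opponent cells, flip only if we land on c
--         j = x + 1
--         while j < 8 and r[j] != '.' and r[j] != c:
--             j += 1
--         if j < 8 and r[j] == c:
--             for k in range(x + 1, j):
--                 r[k] = c
--         # left: symmetric outward walk
--         j = x - 1
--         while j >= 0 and r[j] != '.' and r[j] != c:
--             j -= 1
--         if j >= 0 and r[j] == c:
--             for k in range(j + 1, x):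
--                 r[k] = c
--         c = 'O' if c == '*' else '*'
--     return ''.join(r)
-- ===== Notes on version B (the rewrite author's own statement) =====
-- stated objective: simpler
-- what changed: Replaces A's two full-range backward/forward scans per move (computing a flip boundary with sentinel resets) by a direct outward two-pointer walk over opponent cells in each direction, flipping only when the walk lands on the current color.
-- outside the precondition, e.g. on reversi_row([5, -5]): A returns '...O.O..', B returns '...O.*..'; on reversi_row([8]): A raises IndexError, B raises IndexError
import Mathlib
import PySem

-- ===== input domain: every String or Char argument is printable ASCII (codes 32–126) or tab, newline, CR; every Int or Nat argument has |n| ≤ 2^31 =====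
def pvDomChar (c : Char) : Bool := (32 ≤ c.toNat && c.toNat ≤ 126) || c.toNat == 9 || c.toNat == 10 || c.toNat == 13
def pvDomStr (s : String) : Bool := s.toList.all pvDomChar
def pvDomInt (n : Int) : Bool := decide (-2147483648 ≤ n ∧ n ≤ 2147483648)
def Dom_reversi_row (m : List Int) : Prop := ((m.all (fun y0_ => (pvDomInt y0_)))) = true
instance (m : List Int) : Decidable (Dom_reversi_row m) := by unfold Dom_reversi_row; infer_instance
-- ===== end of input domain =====

-- B (simpler, same cost): per move, an outward two-pointer walk in each direction replaces A's full-range sentinel scans; proved equal on moves in 0..7 (Pre_ excludes out-of-range moves: IndexError or negative-index wraparound in A).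


-- ===== PORT A =====
-- for i in range(a, b): if r[i] != '.': r[i] = c     (A's flip loop, used twice)
def flipA (t : List Char) (c : Char) (a b : Int) : List Char :=
  (PySem.List.pyRange a b 1).foldl
    (fun r i => if r.getD i.toNat ' ' ≠ '.' then r.set i.toNat c else r) t

-- idx = -1; for i in range(7, x, -1): if r[i] == c: idx = i; if r[i] == '.': idx = -1
def scanDownA (t : List Char) (c : Char) (x : Int) : Int :=
  (PySem.List.pyRange 7 x (-1)).foldl
    (fun idx i =>
      let idx1 := if t.getD i.toNat ' ' = c then i else idx
      if t.getD i.toNat ' ' = '.' then (-1 : Int) else idx1) (-1)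

-- idx = 999; for i in range(x): if r[i] == c: idx = i; if r[i] == '.': idx = 999
def scanUpA (t : List Char) (c : Char) (x : Int) : Int :=
  (PySem.List.pyRange 0 x 1).foldl
    (fun idx i =>
      let idx1 := if t.getD i.toNat ' ' = c then i else idx
      if t.getD i.toNat ' ' = '.' then (999 : Int) else idx1) 999

def stepA (rc : List Char × Char) (x : Int) : List Char × Char :=
  let c := rc.2
  let r1 := rc.1.set x.toNat c
  let r2 := flipA r1 c x (scanDownA r1 c x)
  let r3 := flipA r2 c (scanUpA r2 c x) x
  (r3, if c = '*' then 'O' else '*')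

def reversi_row (m : List Int) : String :=
  String.ofList (m.foldl stepA (List.replicate 8 '.', '*')).1

-- ===== PORT B =====
-- while j < 8 and r[j] != '.' and r[j] != c: j += 1     (fuel 8 makes the while structural)
def walkRight (r : List Char) (c : Char) : Nat → Nat → Nat
  | 0, j => j
  | fuel + 1, j =>
    if j < 8 ∧ r.getD j ' ' ≠ '.' ∧ r.getD j ' ' ≠ c then walkRight r c fuel (j + 1) else j

-- while j >= 0 and r[j] != '.' and r[j] != c: j -= 1
def walkLeft (r : List Char) (c : Char) : Nat → Int → Int
  | 0, j => j
  | fuel + 1, j =>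
    if 0 ≤ j ∧ r.getD j.toNat ' ' ≠ '.' ∧ r.getD j.toNat ' ' ≠ c then walkLeft r c fuel (j - 1) else j

-- for k in range(a, b): r[k] = c
def fillB (r : List Char) (c : Char) (a b : Nat) : List Char :=
  (List.range' a (b - a)).foldl (fun r k => r.set k c) r

def stepB (rc : List Char × Char) (x : Int) : List Char × Char :=
  let c := rc.2
  let r1 := rc.1.set x.toNat c
  let j := walkRight r1 c 8 (x.toNat + 1)
  let r2 := if j < 8 ∧ r1.getD j ' ' = c then fillB r1 c (x.toNat + 1) j else r1
  let j2 := walkLeft r2 c 8 (x - 1)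
  let r3 := if 0 ≤ j2 ∧ r2.getD j2.toNat ' ' = c then fillB r2 c (j2.toNat + 1) x.toNat else r2
  (r3, if c = '*' then 'O' else '*')

def reversi_row_alt (m : List Int) : String :=
  String.ofList (m.foldl stepB (List.replicate 8 '.', '*')).1

-- ===== PRECONDITION & SPEC =====
-- Pre_ excludes moves outside 0..7: for x ≥ 8 or x < -8 A raises IndexError, and for
-- -8 ≤ x < 0 A's value comes from Python negative-index wraparound mixed with its 0-based
-- range scans — an accidental corner no caller of an 8-cell Reversi row would specify.
def Pre_reversi_row (m : List Int) : Prop := ∀ x ∈ m, 0 ≤ x ∧ x < 8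
instance (m : List Int) : Decidable (Pre_reversi_row m) := by unfold Pre_reversi_row; infer_instance
def pvWitness_reversi_row : List Int := [2, 5, 3, 4, 6, 1]

def Spec_reversi_row (m : List Int) (out : String) : Prop := out = reversi_row_alt m
instance (m : List Int) (out : String) : Decidable (Spec_reversi_row m out) := by unfold Spec_reversi_row; infer_instance

-- ===== CLAIM (what is proved, stated in full; the proofs are below) =====
def Claim_equal_reversi_row : Prop := ∀ (m : List Int), Dom_reversi_row m → Pre_reversi_row m → Spec_reversi_row m (reversi_row m)

-- ===== LEMMAS AND PROOFS =====

-- generic facts about the loops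

theorem foldl_set_length (c : Char) (l : List Nat) :
    ∀ t : List Char, (l.foldl (fun r k => r.set k c) t).length = t.length := by
  induction l with
  | nil => intro t; rfl
  | cons k l ih => intro t; simpa [List.foldl_cons] using ih (t.set k c)

theorem fillB_length (t : List Char) (c : Char) (a b : Nat) :
    (fillB t c a b).length = t.length := by
  simp [fillB, foldl_set_length]

theorem getD_set (t : List Char) (i j : Nat) (v : Char) :
    (t.set i v).getD j ' ' = if j = i ∧ i < t.length then v else t.getD j ' ' := by
  simp only [List.getD_eq_getElem?_getD, List.getElem?_set]
  split_ifs with h1 h2 h3 <;> simp_all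

theorem set_self (t : List Char) (i : Nat) (v : Char) (h : t.getD i ' ' = v) (_hi : i < t.length) :
    t.set i v = t := by
  apply List.ext_getElem (by simp)
  intro k hk _
  rw [List.getElem_set]
  split
  · subst h; simp_all [List.getD_eq_getElem?_getD]
  · rfl

-- the conditional flip over cells that are all non-'.' is the unconditional fill
theorem condfill_eq (c : Char) (hc : c ≠ '.') : ∀ (l : List Nat) (t : List Char),
    (∀ k ∈ l, t.getD k ' ' ≠ '.') →
    l.foldl (fun r k => if r.getD k ' ' ≠ '.' then r.set k c else r) t
      = l.foldl (fun r k => r.set k c) t := by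
  intro l
  induction l with
  | nil => intro t _; rfl
  | cons k l ih =>
    intro t h
    have hk : t.getD k ' ' ≠ '.' := h k (List.mem_cons_self)
    simp only [List.foldl_cons, if_pos hk]
    refine ih (t.set k c) (fun k' hk' => ?_)
    rw [getD_set]
    split
    · exact hc
    · exact h k' (List.mem_cons_of_mem _ hk')

-- a scan step on an opponent cell (≠ '.' and ≠ c) leaves the accumulator unchanged
theorem scan_skip (t : List Char) (c : Char) (s : Int) :
    ∀ (l : List Int) (acc : Int),
    (∀ i ∈ l, t.getD i.toNat ' ' ≠ '.' ∧ t.getD i.toNat ' ' ≠ c) →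
    l.foldl (fun idx i =>
      let idx1 := if t.getD i.toNat ' ' = c then i else idx
      if t.getD i.toNat ' ' = '.' then s else idx1) acc = acc := by
  intro l
  induction l with
  | nil => intro acc _; rfl
  | cons i l ih =>
    intro acc h
    have hi := h i (List.mem_cons_self)
    simp only [List.foldl_cons, if_neg hi.1, if_neg hi.2]
    exact ih acc (fun i' hi' => h i' (List.mem_cons_of_mem _ hi'))

-- walkRight stops at the first non-opponent cell (or 8)
theorem walkRight_spec (t : List Char) (c : Char) :
    ∀ (fuel j : Nat), j ≤ 8 → 8 ≤ j + fuel →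
    j ≤ walkRight t c fuel j ∧ walkRight t c fuel j ≤ 8 ∧
    (∀ i, j ≤ i → i < walkRight t c fuel j → t.getD i ' ' ≠ '.' ∧ t.getD i ' ' ≠ c) ∧
    (walkRight t c fuel j < 8 →
      t.getD (walkRight t c fuel j) ' ' = '.' ∨ t.getD (walkRight t c fuel j) ' ' = c) := by
  intro fuel
  induction fuel with
  | zero =>
    intro j hj8 hf
    have hj : j = 8 := by omega
    subst hj
    simp only [walkRight]
    exact ⟨le_refl 8, le_refl 8, by omega, by omega⟩
  | succ fuel ih =>
    intro j hj8 hf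
    by_cases hcond : j < 8 ∧ t.getD j ' ' ≠ '.' ∧ t.getD j ' ' ≠ c
    · rw [walkRight, if_pos hcond]
      obtain ⟨ih1, ih2, ih3, ih4⟩ := ih (j + 1) (by omega) (by omega)
      refine ⟨by omega, ih2, ?_, ih4⟩
      intro i h1 h2
      rcases Nat.eq_or_lt_of_le h1 with h | h
      · subst h; exact ⟨hcond.2.1, hcond.2.2⟩
      · exact ih3 i h h2
    · rw [walkRight, if_neg hcond]
      refine ⟨le_refl j, by omega, by omega, ?_⟩
      intro hj
      by_cases h1 : t.getD j ' ' = '.'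
      · exact Or.inl h1
      · refine Or.inr ?_
        by_contra h2
        exact hcond ⟨hj, h1, h2⟩

-- walkLeft stops at the first non-opponent cell going down (or -1)
theorem walkLeft_spec (t : List Char) (c : Char) :
    ∀ (fuel : Nat) (j : Int), -1 ≤ j → (j + 1).toNat ≤ fuel →
    walkLeft t c fuel j ≤ j ∧ -1 ≤ walkLeft t c fuel j ∧
    (∀ i : Int, walkLeft t c fuel j < i → i ≤ j → t.getD i.toNat ' ' ≠ '.' ∧ t.getD i.toNat ' ' ≠ c) ∧
    (0 ≤ walkLeft t c fuel j →
      t.getD (walkLeft t c fuel j).toNat ' ' = '.' ∨ t.getD (walkLeft t c fuel j).toNat ' ' = c) := by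
  intro fuel
  induction fuel with
  | zero =>
    intro j hlo hf
    have hj : j = -1 := by omega
    subst hj
    simp only [walkLeft]
    exact ⟨le_refl _, le_refl _, by omega, by omega⟩
  | succ fuel ih =>
    intro j hlo hf
    by_cases hcond : 0 ≤ j ∧ t.getD j.toNat ' ' ≠ '.' ∧ t.getD j.toNat ' ' ≠ c
    · rw [walkLeft, if_pos hcond]
      obtain ⟨ih1, ih2, ih3, ih4⟩ := ih (j - 1) (by omega) (by omega)
      refine ⟨by omega, ih2, ?_, ih4⟩
      intro i h1 h2
      rcases eq_or_lt_of_le h2 with h | h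
      · subst h; exact ⟨hcond.2.1, hcond.2.2⟩
      · exact ih3 i h1 (by omega)
    · rw [walkLeft, if_neg hcond]
      refine ⟨le_refl j, hlo, by omega, ?_⟩
      · intro hj
        by_cases h1 : t.getD j.toNat ' ' = '.'
        · exact Or.inl h1
        · refine Or.inr ?_
          by_contra h2
          exact hcond ⟨hj, h1, h2⟩

-- casts: a pyRange with Nat endpoints is a mapped Nat range
theorem pyRange_one_natCast (a b : Nat) :
    PySem.List.pyRange (a : Int) (b : Int) 1 = (List.range' a (b - a)).map (fun (k : Nat) => (k : Int)) := by
  rw [PySem.List.pyRange_one, List.range'_eq_map_range]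
  have h : ((b:Int) - (a:Int)).toNat = b - a := by omega
  rw [h]
  induction (b - a) with
  | zero => simp
  | succ k ih => simp [List.range_succ, ih]

-- A's downward scan computes exactly B's right-walk stop (as flip bound)
theorem scanDown_eq (t : List Char) (c : Char) (hc : c ≠ '.') (n : Nat) (hn : n < 8) :
    scanDownA t c n =
      (if walkRight t c 8 (n + 1) < 8 ∧ t.getD (walkRight t c 8 (n + 1)) ' ' = c
        then ((walkRight t c 8 (n + 1) : Nat) : Int) else -1) := by
  obtain ⟨h1, h2, h3, h4⟩ := walkRight_spec t c 8 (n + 1) (by omega) (by omega)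
  set w := walkRight t c 8 (n + 1) with hw
  unfold scanDownA
  have hrev : PySem.List.pyRange 7 (n : Int) (-1) = (PySem.List.pyRange ((n : Int) + 1) 8 1).reverse := by
    rw [PySem.List.pyRange_neg_one_eq_reverse]; norm_num
  rcases eq_or_lt_of_le h2 with h8 | h8
  · rw [if_neg (by omega)]
    rw [hrev]
    apply scan_skip
    intro i hi
    rw [List.mem_reverse, PySem.List.mem_pyRange_one] at hi
    exact h3 i.toNat (by omega) (by omega)
  · have hsplit : PySem.List.pyRange ((n : Int) + 1) 8 1
        = PySem.List.pyRange ((n : Int) + 1) (w : Int) 1 ++ ((w : Int) :: PySem.List.pyRange ((w : Int) + 1) 8 1) := by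
      rw [← PySem.List.pyRange_one_cons (by exact_mod_cast h8)]
      exact PySem.List.pyRange_one_append _ _ _ (by exact_mod_cast h1) (by exact_mod_cast h2)
    rw [hrev, hsplit, List.reverse_append, List.reverse_cons, List.foldl_append, List.foldl_append]
    rw [scan_skip t c (-1) ((PySem.List.pyRange ((n : Int) + 1) (w : Int) 1).reverse) _
      (fun i hi => by
        rw [List.mem_reverse, PySem.List.mem_pyRange_one] at hi
        exact h3 i.toNat (by omega) (by omega))]
    simp only [List.foldl_cons, List.foldl_nil, Int.toNat_natCast]
    rcases h4 h8 with hdot | hcw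
    · have hne : ¬(w < 8 ∧ t.getD w ' ' = c) := fun hcc => hc (hcc.2.symm.trans hdot)
      rw [if_pos hdot, if_neg hne]
    · have hne : t.getD w ' ' ≠ '.' := fun h => hc (hcw.symm.trans h)
      rw [if_neg hne, if_pos hcw, if_pos ⟨h8, hcw⟩]

-- A's upward scan computes exactly B's left-walk stop (as flip start)
theorem scanUp_eq (t : List Char) (c : Char) (hc : c ≠ '.') (n : Nat) (hn : n < 8) :
    scanUpA t c n =
      (if 0 ≤ walkLeft t c 8 ((n : Int) - 1) ∧ t.getD (walkLeft t c 8 ((n : Int) - 1)).toNat ' ' = c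
        then walkLeft t c 8 ((n : Int) - 1) else 999) := by
  obtain ⟨g1, g2, g3, g4⟩ := walkLeft_spec t c 8 ((n : Int) - 1) (by omega) (by omega)
  set v := walkLeft t c 8 ((n : Int) - 1) with hv
  unfold scanUpA
  rcases lt_or_ge v 0 with hneg | hpos
  · rw [if_neg (fun h => by omega)]
    apply scan_skip
    intro i hi
    rw [PySem.List.mem_pyRange_one] at hi
    exact g3 i (by omega) (by omega)
  · have hsplit : PySem.List.pyRange 0 (n : Int) 1
        = PySem.List.pyRange 0 v 1 ++ (v :: PySem.List.pyRange (v + 1) (n : Int) 1) := by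
      rw [← PySem.List.pyRange_one_cons (by omega)]
      exact PySem.List.pyRange_one_append _ _ _ (by omega) (by omega)
    rw [hsplit, List.foldl_append]
    rw [List.foldl_cons]
    rw [scan_skip t c 999 (PySem.List.pyRange (v + 1) (n : Int) 1) _
      (fun i hi => by
        rw [PySem.List.mem_pyRange_one] at hi
        exact g3 i (by omega) (by omega))]
    rcases g4 hpos with hdot | hcw
    · have hne : ¬(0 ≤ v ∧ t.getD v.toNat ' ' = c) := fun hcc => hc (hcc.2.symm.trans hdot)
      rw [if_pos hdot, if_neg hne]
    · have hne : t.getD v.toNat ' ' ≠ '.' := fun h => hc (hcw.symm.trans h)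
      rw [if_neg hne, if_pos hcw, if_pos ⟨hpos, hcw⟩]

theorem foldl_toNat_map (c : Char) : ∀ (l : List Nat) (t : List Char),
    List.foldl (fun r (i : Int) => if r.getD i.toNat ' ' ≠ '.' then r.set i.toNat c else r) t
      (l.map (fun (k : Nat) => (k : Int)))
    = List.foldl (fun r k => if r.getD k ' ' ≠ '.' then r.set k c else r) t l := by
  intro l
  induction l with
  | nil => intro t; rfl
  | cons k l ih =>
    intro t
    simp only [List.map_cons, List.foldl_cons, Int.toNat_natCast]
    split <;> exact ih _

theorem flipA_empty (t : List Char) (c : Char) (a b : Int) (h : b ≤ a) : flipA t c a b = t := by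
  unfold flipA
  rw [PySem.List.pyRange_one_eq_nil h]
  rfl

-- A's conditional flip over [a, b) with r[a] = c and opponents in between is B's fill of (a, b)
theorem flipA_fill (t : List Char) (c : Char) (hc : c ≠ '.') (ht8 : t.length = 8)
    (a b : Nat) (hab : a < b) (hb : b ≤ 8) (hcell : t.getD a ' ' = c)
    (hopp : ∀ i, a < i → i < b → t.getD i ' ' ≠ '.') :
    flipA t c (a : Int) (b : Int) = fillB t c (a + 1) b := by
  unfold flipA
  rw [PySem.List.pyRange_one_cons (by exact_mod_cast hab), List.foldl_cons]
  simp only [Int.toNat_natCast]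
  rw [if_pos (fun h => hc (hcell.symm.trans h)), set_self t a c hcell (by omega)]
  have hcast : (a : Int) + 1 = ((a + 1 : Nat) : Int) := by push_cast; ring
  rw [hcast, pyRange_one_natCast (a + 1) b, foldl_toNat_map]
  rw [condfill_eq c hc _ t (fun k hk => by
    rw [List.mem_range'_1] at hk
    exact hopp k (by omega) (by omega))]
  rfl

-- one move of A = one move of B (on a length-8 row, colour ≠ '.', move in 0..7)
theorem step_eq (r : List Char) (c : Char) (hc : c ≠ '.') (hr : r.length = 8)
    (x : Int) (hx0 : 0 ≤ x) (hx8 : x < 8) :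
    stepA (r, c) x = stepB (r, c) x := by
  obtain ⟨n, rfl⟩ : ∃ n : Nat, x = (n : Int) := ⟨x.toNat, (Int.toNat_of_nonneg hx0).symm⟩
  have hn : n < 8 := by exact_mod_cast hx8
  simp only [stepA, stepB, Int.toNat_natCast]
  set t := r.set n c with htdef
  have ht8 : t.length = 8 := by simp [htdef, hr]
  have hcell : t.getD n ' ' = c := by
    rw [htdef, getD_set]
    rw [if_pos ⟨rfl, by omega⟩]
  -- right half
  obtain ⟨h1, h2, h3, h4⟩ := walkRight_spec t c 8 (n + 1) (by omega) (by omega)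
  set w := walkRight t c 8 (n + 1) with hw
  rw [scanDown_eq t c hc n hn, ← hw]
  have hright : flipA t c (n : Int) (if w < 8 ∧ t.getD w ' ' = c then ((w : Nat) : Int) else -1)
      = (if w < 8 ∧ t.getD w ' ' = c then fillB t c (n + 1) w else t) := by
    by_cases hR : w < 8 ∧ t.getD w ' ' = c
    · rw [if_pos hR, if_pos hR]
      exact flipA_fill t c hc ht8 n w (by omega) (by omega) hcell
        (fun i hi1 hi2 => (h3 i (by omega) (by omega)).1)
    · rw [if_neg hR, if_neg hR]
      exact flipA_empty t c _ _ (by omega)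
  rw [hright]
  set t2 := (if w < 8 ∧ t.getD w ' ' = c then fillB t c (n + 1) w else t) with ht2def
  have ht28 : t2.length = 8 := by
    rw [ht2def]; split <;> simp [fillB_length, ht8]
  -- left half
  obtain ⟨g1, g2, g3, g4⟩ := walkLeft_spec t2 c 8 ((n : Int) - 1) (by omega) (by omega)
  set v := walkLeft t2 c 8 ((n : Int) - 1) with hv
  rw [scanUp_eq t2 c hc n hn, ← hv]
  have hleft : flipA t2 c (if 0 ≤ v ∧ t2.getD v.toNat ' ' = c then v else 999) (n : Int)
      = (if 0 ≤ v ∧ t2.getD v.toNat ' ' = c then fillB t2 c (v.toNat + 1) n else t2) := by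
    by_cases hL : 0 ≤ v ∧ t2.getD v.toNat ' ' = c
    · rw [if_pos hL, if_pos hL]
      have hvn : v.toNat < n := by omega
      have hveq : ((v.toNat : Nat) : Int) = v := Int.toNat_of_nonneg hL.1
      rw [← hveq]
      exact flipA_fill t2 c hc ht28 v.toNat n hvn (by omega) hL.2
        (fun i hi1 hi2 => by
          have h := (g3 (i : Int) (by omega) (by omega)).1
          simpa using h)
    · rw [if_neg hL, if_neg hL]
      exact flipA_empty t2 c _ _ (by omega)
  rw [hleft]

theorem stepB_length (rc : List Char × Char) (x : Int) (h : rc.1.length = 8) :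
    (stepB rc x).1.length = 8 := by
  simp only [stepB]
  split <;> split <;> simp [fillB_length, h]

theorem fold_eq (m : List Int) (hm : ∀ x ∈ m, 0 ≤ x ∧ x < 8) :
    ∀ (s : List Char × Char), s.1.length = 8 → s.2 ≠ '.' →
      m.foldl stepA s = m.foldl stepB s := by
  induction m with
  | nil => intro s _ _; rfl
  | cons x m ih =>
    intro s hlen hc
    have hx := hm x (List.mem_cons_self)
    have hstep : stepA s x = stepB s x := by
      obtain ⟨r, c⟩ := s
      exact step_eq r c hc hlen x hx.1 hx.2
    simp only [List.foldl_cons, hstep]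
    refine ih (fun y hy => hm y (List.mem_cons_of_mem _ hy)) _ (stepB_length s x hlen) ?_
    simp only [stepB]
    split <;> simp

-- ===== VERDICT (by name: the statement is the Claim_ definition above) =====
theorem reversi_row_spec : Claim_equal_reversi_row := by
  intro m _ hpre
  unfold Spec_reversi_row reversi_row reversi_row_alt
  rw [fold_eq m hpre (List.replicate 8 '.', '*') (by simp) (by decide)]
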